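-- pv_equiv track=rewrite | github.com/Ultraviolet-Ninja/MyCompProgExperience | src/competition/kattis/jazz/lab1/flowlayout.py | calculate_layout
-- ===== SOURCE A (Python) =====
-- class Row:
--     """
--     Holds width and height for a row of rectangles
--     """
--     def __init__(self):
--         self.width = 0
--         self.height = 0
--
-- def calculate_layout(max_width, widths, heights):
--     """Calculate dimensions of each row, then compile these dimensions to calculate the window layout.
--
--     :param max_width: maximum width of window
--     :param widths: widths of rectangles
--     :param heights: heights of rectangles
--     :return: (window width, window height)
--     """
--     rows = [Row()]  # start with one row, and always operate on most recent row (rows[-1])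
--     for width, height in zip(widths, heights):
--         if rows[-1].width + width > max_width:
--             # exceeds max width => need a new row
--             rows.append(Row())
--         # at this point, we know the width fits
--         rows[-1].width += width
--         # change height of row if rectangle height is larger
--         rows[-1].height = max(rows[-1].height, height)
--
--     win_width = max(row.width for row in rows)
--     win_height = sum(row.height for row in rows)
--
--     return win_width, win_height
-- ===== SOURCE B (Python) =====
-- def calculate_layout(max_width, widths, heights):
--     """Single pass with scalar accumulators: track the current row's width/height
--     and fold finished rows into running window width (max) and height (sum)."""
--     win_width = None  # max width over finished rows (None = no row finished yet)
--     win_height = 0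
--     cur_w = 0
--     cur_h = 0
--     for width, height in zip(widths, heights):
--         if cur_w + width > max_width:
--             win_width = cur_w if win_width is None else max(win_width, cur_w)
--             win_height += cur_h
--             cur_w = 0
--             cur_h = 0
--         cur_w += width
--         cur_h = max(cur_h, height)
--     win_width = cur_w if win_width is None else max(win_width, cur_w)
--     return win_width, win_height + cur_h
-- ===== Notes on version B (the rewrite author's own statement) =====
-- stated objective: simpler
-- what changed: Replaces the Row class, the growing rows list and the two trailing scans (max and sum over rows) with a single fused pass over scalar accumulators that finalizes each row into a running max/sum as it closes.
import Mathlib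
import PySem

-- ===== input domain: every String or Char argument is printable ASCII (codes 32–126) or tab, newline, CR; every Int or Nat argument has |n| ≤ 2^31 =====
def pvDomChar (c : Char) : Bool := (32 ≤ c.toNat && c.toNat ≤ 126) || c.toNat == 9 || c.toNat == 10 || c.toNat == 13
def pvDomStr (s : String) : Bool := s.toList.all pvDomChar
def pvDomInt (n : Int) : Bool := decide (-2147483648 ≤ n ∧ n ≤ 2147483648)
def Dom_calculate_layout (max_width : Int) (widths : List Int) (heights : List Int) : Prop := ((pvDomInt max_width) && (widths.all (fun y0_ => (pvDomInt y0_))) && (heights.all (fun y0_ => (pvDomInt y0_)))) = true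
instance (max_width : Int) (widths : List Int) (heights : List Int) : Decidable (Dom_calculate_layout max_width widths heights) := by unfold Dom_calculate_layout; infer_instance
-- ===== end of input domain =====

-- B replaces A's list of Row objects and its two trailing scans with one pass over
-- scalar accumulators (objective: simpler; same O(n) cost).

-- ===== PORT A =====
-- A's rows list: each row is (width, height); rows is always nonempty, rows[-1] is the last element.
-- rows[-1].width  (list is nonempty throughout)
def pvLastW : List (Int × Int) → Int
  | [] => 0
  | [r] => r.1
  | _ :: rs => pvLastW rs

-- in-place update of rows[-1]
def pvUpdLast (f : Int × Int → Int × Int) : List (Int × Int) → List (Int × Int)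
  | [] => []
  | [r] => [f r]
  | r :: rs => r :: pvUpdLast f rs

-- one iteration of A's for-loop body
def pvAStep (max_width : Int) (rows : List (Int × Int)) (wh : Int × Int) : List (Int × Int) :=
  let rows1 := if pvLastW rows + wh.1 > max_width then rows ++ [(0, 0)] else rows
  pvUpdLast (fun r => (r.1 + wh.1, max r.2 wh.2)) rows1

-- max(row.width for row in rows): Python max over a nonempty sequence
def pvMaxW : List (Int × Int) → Int
  | [] => 0
  | r :: rs => rs.foldl (fun m p => max m p.1) r.1

-- sum(row.height for row in rows)
def pvSumH (rows : List (Int × Int)) : Int := rows.foldl (fun s p => s + p.2) 0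

def calculate_layout (max_width : Int) (widths : List Int) (heights : List Int) : Int × Int :=
  let rows := (widths.zip heights).foldl (pvAStep max_width) [((0 : Int), (0 : Int))]
  (pvMaxW rows, pvSumH rows)

-- ===== PORT B =====
-- B's state: (win_width : Option Int, win_height, cur_w, cur_h)
def pvFinW (o : Option Int) (cw : Int) : Int :=
  match o with
  | none => cw
  | some ww => max ww cw

def pvBStep (max_width : Int) (st : Option Int × Int × Int × Int) (wh : Int × Int) :
    Option Int × Int × Int × Int :=
  let (ww, whh, cw, ch) := st
  if cw + wh.1 > max_width then
    (some (pvFinW ww cw), whh + ch, 0 + wh.1, max 0 wh.2)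
  else
    (ww, whh, cw + wh.1, max ch wh.2)

def calculate_layout_alt (max_width : Int) (widths : List Int) (heights : List Int) : Int × Int :=
  let st := (widths.zip heights).foldl (pvBStep max_width) (none, 0, 0, 0)
  (pvFinW st.1 st.2.2.1, st.2.1 + st.2.2.2)

-- ===== PRECONDITION & SPEC =====
def Spec_calculate_layout (max_width : Int) (widths : List Int) (heights : List Int) (out : Int × Int) : Prop := out = calculate_layout_alt max_width widths heights
instance (max_width : Int) (widths : List Int) (heights : List Int) (out : Int × Int) : Decidable (Spec_calculate_layout max_width widths heights out) := by unfold Spec_calculate_layout; infer_instance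

-- ===== CLAIM (what is proved, stated in full; the proofs are below) =====
def Claim_equal_calculate_layout : Prop := ∀ (max_width : Int) (widths : List Int) (heights : List Int), Dom_calculate_layout max_width widths heights → Spec_calculate_layout max_width widths heights (calculate_layout max_width widths heights)

-- ===== LEMMAS AND PROOFS =====

lemma pvUpdLast_ne_nil (f : Int × Int → Int × Int) (l : List (Int × Int)) (h : l ≠ []) :
    pvUpdLast f l ≠ [] := by
  cases l with
  | nil => exact absurd rfl h
  | cons r rs => cases rs <;> simp [pvUpdLast]

lemma pvAStep_ne_nil (max_width : Int) (rows : List (Int × Int)) (wh : Int × Int)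
    (h : rows ≠ []) : pvAStep max_width rows wh ≠ [] := by
  unfold pvAStep
  apply pvUpdLast_ne_nil
  split <;> simp [h]

lemma pvLastW_cons (a : Int × Int) (l : List (Int × Int)) (h : l ≠ []) :
    pvLastW (a :: l) = pvLastW l := by
  cases l with
  | nil => exact absurd rfl h
  | cons b bs => rfl

lemma pvUpdLast_cons (f : Int × Int → Int × Int) (a : Int × Int) (l : List (Int × Int))
    (h : l ≠ []) : pvUpdLast f (a :: l) = a :: pvUpdLast f l := by
  cases l with
  | nil => exact absurd rfl h
  | cons b bs => rfl

lemma pvAStep_cons (max_width : Int) (a : Int × Int) (rows : List (Int × Int)) (wh : Int × Int)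
    (h : rows ≠ []) : pvAStep max_width (a :: rows) wh = a :: pvAStep max_width rows wh := by
  unfold pvAStep
  rw [pvLastW_cons a rows h]
  split
  · rw [show (a :: rows) ++ [((0:Int),(0:Int))] = a :: (rows ++ [((0:Int),(0:Int))]) from rfl,
      pvUpdLast_cons _ _ _ (by simp)]
  · rw [pvUpdLast_cons _ _ _ h]

-- the loop never touches rows other than the last: a fixed head element passes through
lemma pvALoop_cons (max_width : Int) (items : List (Int × Int)) (a : Int × Int)
    (rows : List (Int × Int)) (h : rows ≠ []) :
    items.foldl (pvAStep max_width) (a :: rows) =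
      a :: items.foldl (pvAStep max_width) rows := by
  induction items generalizing rows with
  | nil => rfl
  | cons wh rest ih =>
    simp only [List.foldl_cons]
    rw [pvAStep_cons max_width a rows wh h]
    exact ih _ (pvAStep_ne_nil max_width rows wh h)

lemma pvALoop_ne_nil (max_width : Int) (items : List (Int × Int))
    (rows : List (Int × Int)) (h : rows ≠ []) :
    items.foldl (pvAStep max_width) rows ≠ [] := by
  induction items generalizing rows with
  | nil => exact h
  | cons wh rest ih =>
    simpa using ih _ (pvAStep_ne_nil max_width rows wh h)

lemma pvFoldMax (rs : List (Int × Int)) (b c : Int) :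
    rs.foldl (fun m p => max m p.1) (max c b) =
      max c (rs.foldl (fun m p => max m p.1) b) := by
  induction rs generalizing b with
  | nil => rfl
  | cons p rest ih =>
    simp only [List.foldl_cons]
    rw [max_assoc, ih]

lemma pvMaxW_cons (a : Int × Int) (l : List (Int × Int)) (h : l ≠ []) :
    pvMaxW (a :: l) = max a.1 (pvMaxW l) := by
  cases l with
  | nil => exact absurd rfl h
  | cons r rs =>
    simp only [pvMaxW, List.foldl_cons]
    exact pvFoldMax rs r.1 a.1

lemma pvFoldSum (rs : List (Int × Int)) (c : Int) :
    rs.foldl (fun s p => s + p.2) c = c + rs.foldl (fun s p => s + p.2) 0 := by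
  induction rs generalizing c with
  | nil => simp
  | cons p rest ih =>
    simp only [List.foldl_cons]
    rw [ih (c + p.2), ih (0 + p.2)]
    ring

lemma pvSumH_cons (a : Int × Int) (l : List (Int × Int)) :
    pvSumH (a :: l) = a.2 + pvSumH l := by
  simp only [pvSumH, List.foldl_cons]
  rw [pvFoldSum l (0 + a.2)]
  ring

lemma pvMain (max_width : Int) (items : List (Int × Int)) (o : Option Int) (wh cw ch : Int) :
    (let st := items.foldl (pvBStep max_width) (o, wh, cw, ch)
     (pvFinW st.1 st.2.2.1, st.2.1 + st.2.2.2)) =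
    (pvFinW o (pvMaxW (items.foldl (pvAStep max_width) [(cw, ch)])),
     wh + pvSumH (items.foldl (pvAStep max_width) [(cw, ch)])) := by
  induction items generalizing o wh cw ch with
  | nil =>
    simp [pvMaxW, pvSumH]
  | cons p rest ih =>
    simp only [List.foldl_cons]
    by_cases hc : cw + p.1 > max_width
    · have hstepA : pvAStep max_width [(cw, ch)] p =
          [(cw, ch), (0 + p.1, max 0 p.2)] := by
        simp [pvAStep, pvLastW, pvUpdLast, hc]
      have hstepB : pvBStep max_width (o, wh, cw, ch) p =
          (some (pvFinW o cw), wh + ch, 0 + p.1, max 0 p.2) := by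
        simp [pvBStep, hc]
      rw [hstepA, hstepB, ih]
      rw [show ((cw, ch) :: [((0:Int) + p.1, max 0 p.2)]) =
            (cw, ch) :: [(0 + p.1, max 0 p.2)] from rfl]
      rw [pvALoop_cons max_width rest (cw, ch) [(0 + p.1, max 0 p.2)] (by simp)]
      have hne := pvALoop_ne_nil max_width rest [((0:Int) + p.1, max 0 p.2)] (by simp)
      rw [pvMaxW_cons _ _ hne, pvSumH_cons]
      simp only [Prod.mk.injEq]
      constructor
      · cases o <;> simp [pvFinW, max_assoc]
      · ring_nf
    · have hstepA : pvAStep max_width [(cw, ch)] p =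
          [(cw + p.1, max ch p.2)] := by
        simp [pvAStep, pvLastW, pvUpdLast, hc]
      have hstepB : pvBStep max_width (o, wh, cw, ch) p =
          (o, wh, cw + p.1, max ch p.2) := by
        simp [pvBStep, hc]
      rw [hstepA, hstepB, ih]

-- ===== VERDICT (by name: the statement is the Claim_ definition above) =====
theorem calculate_layout_spec : Claim_equal_calculate_layout := by
  intro max_width widths heights _
  unfold Spec_calculate_layout calculate_layout calculate_layout_alt
  have h := pvMain max_width (widths.zip heights) none 0 0 0
  simp only [pvFinW] at h
  simpa using h.symm
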